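-- pv_equiv track=rewrite | github.com/CloudiQS/cloudiqs-agents | bridge/app/ace_control_plane.py | _build_cosell
-- ===== SOURCE A (Python) =====
-- def _build_cosell(cosell_rows: list[list[str]]) -> list[str]:
--     """Return formatted co-sell lines grouped by AWS rep."""
--     if not cosell_rows:
--         return ["No active co-sell engagements found."]
--
--     # Group by rep name
--     reps: dict[str, list] = {}
--     for row in cosell_rows:
--         if len(row) < 5:
--             continue
--         rep = row[3]
--         if rep not in reps:
--             reps[rep] = []
--         reps[rep].append(row)
--
--     lines: list[str] = []
--     for rep, deals in sorted(reps.items(), key=lambda x: len(x[1]), reverse=True)[:6]: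
--         total_rev = len(deals)  # approximation without revenue parsing
--         deal_list = ", ".join(r[1] for r in deals[:3])
--         extra = f" + {len(deals) - 3} more" if len(deals) > 3 else ""
--         lines.append(f"{rep} — {deal_list}{extra}")
--
--     lines.append("")
--     lines.append("→ Thank these reps. They are sending you business.")
--     lines.append("→ Update them on progress. They check ACE too.")
--
--     return lines
-- ===== SOURCE B (Python) =====
-- def _select_top(remaining, counts, k):
--     """First-maximal selection: pick top-k reps by count, ties by first appearance."""
--     if k == 0 or not remaining:
--         return []
--     best = max(remaining, key=lambda r: counts[r])
--     return [best] + _select_top([r for r in remaining if r != best], counts, k - 1)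
--
--
-- def _format_rep(rep, n, valid):
--     deals = [r[1] for r in valid if r[3] == rep][:3]
--     extra = f" + {n - 3} more" if n > 3 else ""
--     return f"{rep} — {', '.join(deals)}{extra}"
--
--
-- def _build_cosell(cosell_rows: list[list[str]]) -> list[str]:
--     """Return formatted co-sell lines grouped by AWS rep."""
--     if not cosell_rows:
--         return ["No active co-sell engagements found."]
--
--     valid = [row for row in cosell_rows if len(row) >= 5]
--
--     counts: dict[str, int] = {}
--     for row in valid:
--         counts[row[3]] = counts.get(row[3], 0) + 1
--
--     top = _select_top(list(counts), counts, 6)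
--     lines = [_format_rep(rep, counts[rep], valid) for rep in top]
--
--     return lines + [
--         "",
--         "→ Thank these reps. They are sending you business.",
--         "→ Update them on progress. They check ACE too.",
--     ]
-- ===== Notes on version B (the rewrite author's own statement) =====
-- stated objective: alternative
-- what changed: Replaces the dict-of-row-lists plus full stable sort of all reps with a counts dict and a recursive bounded selection (repeated first-maximal extraction, at most 6 rounds), formatting each selected rep by filtering the valid rows directly.
import Mathlib
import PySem

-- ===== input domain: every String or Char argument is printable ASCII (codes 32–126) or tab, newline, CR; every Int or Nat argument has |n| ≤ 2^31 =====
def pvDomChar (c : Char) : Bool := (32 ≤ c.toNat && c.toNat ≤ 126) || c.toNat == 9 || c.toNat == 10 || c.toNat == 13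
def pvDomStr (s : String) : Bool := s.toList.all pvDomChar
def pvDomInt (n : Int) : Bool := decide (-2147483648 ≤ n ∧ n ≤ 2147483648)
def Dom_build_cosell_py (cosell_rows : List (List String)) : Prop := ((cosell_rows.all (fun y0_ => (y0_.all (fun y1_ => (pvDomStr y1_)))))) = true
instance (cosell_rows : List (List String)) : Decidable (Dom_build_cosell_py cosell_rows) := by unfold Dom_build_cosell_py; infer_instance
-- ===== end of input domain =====

-- B replaces A's dict-of-row-lists and full stable sort of all reps by a counts dict plus a
-- recursive bounded selection (at most 6 first-maximal extractions), formatting each selected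
-- rep by filtering the valid rows directly (objective: alternative algorithm, similar cost).

-- ===== PORT A =====
def build_cosell_py (cosell_rows : List (List String)) : List String :=
  if cosell_rows = [] then ["No active co-sell engagements found."]
  else
    let reps := cosell_rows.foldl (fun d row =>
      if row.length < 5 then d
      else
        let rep := PySem.List.pyGetD row 3 ""
        let d' := if d.contains rep then d else d.insert rep ([] : List (List String))
        d'.insert rep (d'.getD rep [] ++ [row])) PySem.Dict.empty
    let top := (PySem.List.sorted reps.items (fun p => (p.2.length : Int)) true).take 6
    let lines := top.foldl (fun acc p =>
      let deals := p.2
      let deal_list := PySem.Str.join ", " ((deals.take 3).map (fun r => PySem.List.pyGetD r 1 ""))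
      let extra := if deals.length > 3 then " + " ++ PySem.Int.toStr ((deals.length : Int) - 3) ++ " more" else ""
      acc ++ [p.1 ++ " — " ++ deal_list ++ extra]) ([] : List String)
    lines ++ ["", "→ Thank these reps. They are sending you business.",
              "→ Update them on progress. They check ACE too."]

-- ===== PORT B =====
-- helper _select_top of Source B: pick top-k by count, ties by first appearance (Python max = first maximal)
def selectTop_alt (remaining : List String) (counts : PySem.Dict String Int) (k : Nat) : List String :=
  match k with
  | 0 => []
  | Nat.succ k' =>
    match PySem.List.max? remaining (fun r => counts.getD r 0) with
    | none => []          -- 'not remaining'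
    | some best => best :: selectTop_alt (remaining.filter (fun r => r != best)) counts k'

-- helper _format_rep of Source B
def formatRep_alt (rep : String) (n : Int) (valid : List (List String)) : String :=
  let deals := ((valid.filter (fun r => PySem.List.pyGetD r 3 "" == rep)).map
                  (fun r => PySem.List.pyGetD r 1 "")).take 3
  let extra := if n > 3 then " + " ++ PySem.Int.toStr (n - 3) ++ " more" else ""
  rep ++ " — " ++ PySem.Str.join ", " deals ++ extra

def build_cosell_py_alt (cosell_rows : List (List String)) : List String :=
  if cosell_rows = [] then ["No active co-sell engagements found."]
  else
    let valid := cosell_rows.filter (fun row => decide (row.length ≥ 5))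
    let counts := valid.foldl (fun d row =>
      d.insert (PySem.List.pyGetD row 3 "") (d.getD (PySem.List.pyGetD row 3 "") 0 + 1))
      PySem.Dict.empty
    let top := selectTop_alt counts.keys counts 6
    let lines := top.map (fun rep => formatRep_alt rep (counts.getD rep 0) valid)
    lines ++ ["", "→ Thank these reps. They are sending you business.",
              "→ Update them on progress. They check ACE too."]

-- ===== PRECONDITION & SPEC =====
def Spec_build_cosell_py (cosell_rows : List (List String)) (out : List String) : Prop := out = build_cosell_py_alt cosell_rows
instance (cosell_rows : List (List String)) (out : List String) : Decidable (Spec_build_cosell_py cosell_rows out) := by unfold Spec_build_cosell_py; infer_instance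

-- ===== CLAIM (what is proved, stated in full; the proofs are below) =====
def Claim_equal_build_cosell_py : Prop := ∀ (cosell_rows : List (List String)), Dom_build_cosell_py cosell_rows → Spec_build_cosell_py cosell_rows (build_cosell_py cosell_rows)

-- ===== LEMMAS AND PROOFS =====

-- helper notions for the proofs
def repOf (row : List String) : String := PySem.List.pyGetD row 3 ""
def validOf (rows : List (List String)) : List (List String) :=
  rows.filter (fun row => decide (row.length ≥ 5))
def dealsOf (valid : List (List String)) (k : String) : List (List String) :=
  valid.filter (fun row => repOf row == k)

def selSortRev (key : String → Int) (xs : List String) : List String :=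
  match _h : PySem.List.max? xs key with
  | none => []
  | some m => m :: selSortRev key (xs.filter (fun r => r != m))
termination_by xs.length
decreasing_by
  simp only [List.unattach_filter, List.unattach_attach]
  rw [List.length_filter_lt_length_iff_exists]
  exact ⟨m, PySem.List.max?_mem _h, by simp⟩

theorem selSortRev_none {key : String → Int} {xs : List String}
    (h : PySem.List.max? xs key = none) : selSortRev key xs = [] := by
  rw [selSortRev.eq_def]; split <;> simp_all

theorem selSortRev_some {key : String → Int} {xs : List String} {m : String}
    (h : PySem.List.max? xs key = some m) :
    selSortRev key xs = m :: selSortRev key (xs.filter (fun r => r != m)) := by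
  rw [selSortRev.eq_def]; split <;> simp_all

theorem max?_append_one (key : String → Int) (ys : List String) (x : String) :
    PySem.List.max? (ys ++ [x]) key =
      (match PySem.List.max? ys key with
       | none => some x
       | some m => if key m < key x then some x else some m) := by
  cases hf : PySem.List.max? ys key with
  | none =>
    obtain rfl : ys = [] := (PySem.List.max?_eq_none_iff _ _).mp hf
    simp [PySem.List.max?]
  | some m =>
    simp only [PySem.List.max?] at hf ⊢
    rw [List.foldl_append, hf]
    simp

theorem sel_base (key : String → Int) (x : String) :
    selSortRev key [x] = [x] := by
  rw [selSortRev_some (xs := [x]) (m := x) (by simp [PySem.List.max?])]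
  simp [selSortRev_none (xs := ([] : List String)) ((PySem.List.max?_eq_none_iff _ _).mpr rfl)]

theorem sel_insert (key : String → Int) :
    ∀ (n : Nat) (ys : List String) (x : String), ys.length ≤ n → (ys ++ [x]).Nodup →
    selSortRev key (ys ++ [x]) =
      PySem.List.insertBy (fun a b => decide (key b < key a)) x (selSortRev key ys) := by
  intro n
  induction n with
  | zero =>
    intro ys x hlen _
    obtain rfl : ys = [] := List.eq_nil_of_length_eq_zero (Nat.le_zero.mp hlen)
    simp only [List.nil_append, sel_base,
      selSortRev_none ((PySem.List.max?_eq_none_iff ([] : List String) key).mpr rfl)]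
    simp [PySem.List.insertBy]
  | succ n ih =>
    intro ys x hlen hnd
    have hndys : ys.Nodup := (List.nodup_append.mp hnd).1
    have hxys : x ∉ ys := fun hx =>
      (List.disjoint_of_nodup_append hnd) hx (by simp)
    cases hys : PySem.List.max? ys key with
    | none =>
      obtain rfl : ys = [] := (PySem.List.max?_eq_none_iff _ _).mp hys
      simp only [List.nil_append, sel_base, selSortRev_none hys]
      simp [PySem.List.insertBy]
    | some m =>
      have hm : m ∈ ys := PySem.List.max?_mem hys
      have hxm : x ≠ m := fun h => hxys (h ▸ hm)
      have h1 : ys.filter (fun r => r != x) = ys :=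
        List.filter_eq_self.mpr (fun y hy => by
          simpa using fun h : y = x => hxys (h ▸ hy))
      by_cases hlt : key m < key x
      · have hmax : PySem.List.max? (ys ++ [x]) key = some x := by
          rw [max?_append_one, hys]; simp [hlt]
        rw [selSortRev_some hmax]
        have hfil : (ys ++ [x]).filter (fun r => r != x) = ys := by
          rw [List.filter_append, h1]; simp
        rw [hfil, selSortRev_some hys, PySem.List.insertBy]
        simp [hlt]
      · have hmax : PySem.List.max? (ys ++ [x]) key = some m := by
          rw [max?_append_one, hys]; simp [hlt]
        rw [selSortRev_some hmax]
        have hfil : (ys ++ [x]).filter (fun r => r != m) = ys.filter (fun r => r != m) ++ [x] := by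
          rw [List.filter_append]; simp [hxm]
        rw [hfil]
        have hlen2 : (ys.filter (fun r => r != m)).length ≤ n := by
          have : (ys.filter (fun r => r != m)).length < ys.length := by
            rw [List.length_filter_lt_length_iff_exists]
            exact ⟨m, hm, by simp⟩
          omega
        have hnd2 : (ys.filter (fun r => r != m) ++ [x]).Nodup := by
          rw [List.nodup_append]
          refine ⟨hndys.filter _, List.nodup_singleton x, ?_⟩
          intro a ha b hb
          simp at hb; subst hb
          exact fun h => hxys (h ▸ (List.mem_of_mem_filter ha))
        rw [ih _ x hlen2 hnd2]
        rw [selSortRev_some hys, PySem.List.insertBy]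
        simp [hlt]

theorem sorted_rev_eq_selSortRev (key : String → Int) (xs : List String) (hnd : xs.Nodup) :
    PySem.List.sorted xs key true = selSortRev key xs := by
  induction xs using List.reverseRecOn with
  | nil =>
    rw [selSortRev_none ((PySem.List.max?_eq_none_iff _ _).mpr rfl)]
    rfl
  | append_singleton ys x ih =>
    rw [PySem.List.sorted_rev_eq_foldl_insertBy, List.foldl_append]
    simp only [List.foldl_cons, List.foldl_nil]
    rw [← PySem.List.sorted_rev_eq_foldl_insertBy,
      ih ((List.nodup_append.mp hnd).1),
      ← sel_insert key ys.length ys x le_rfl hnd]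

theorem insertBy_map {α β : Type} (f : α → β) (before : β → β → Bool) (x : α) (ys : List α) :
    PySem.List.insertBy before (f x) (ys.map f) =
      (PySem.List.insertBy (fun a b => before (f a) (f b)) x ys).map f := by
  induction ys with
  | nil => simp [PySem.List.insertBy]
  | cons y t ih =>
    rw [List.map_cons, PySem.List.insertBy, PySem.List.insertBy]
    by_cases h : before (f x) (f y)
    · simp [h]
    · simp [h, ih]

theorem foldl_insertBy_map {α β : Type} (f : α → β) (before : β → β → Bool) :
    ∀ (xs : List α) (ys : List α),
    xs.foldl (fun acc x => PySem.List.insertBy before (f x) acc) (ys.map f) =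
      (xs.foldl (fun acc x => PySem.List.insertBy (fun a b => before (f a) (f b)) x acc) ys).map f := by
  intro xs
  induction xs with
  | nil => simp
  | cons x t ih =>
    intro ys
    simp only [List.foldl_cons]
    rw [insertBy_map, ih]

theorem sorted_rev_map {α β : Type} (f : α → β) (key : β → Int) (xs : List α) :
    PySem.List.sorted (xs.map f) key true =
      (PySem.List.sorted xs (fun a => key (f a)) true).map f := by
  rw [PySem.List.sorted_rev_eq_foldl_insertBy, PySem.List.sorted_rev_eq_foldl_insertBy,
    List.foldl_map]
  have := foldl_insertBy_map f (fun a b => decide (key b < key a)) xs []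
  simpa using this


theorem selectTop_eq_take (counts : PySem.Dict String Int) :
    ∀ (k : Nat) (xs : List String),
    selectTop_alt xs counts k = (selSortRev (fun r => counts.getD r 0) xs).take k := by
  intro k
  induction k with
  | zero => intro xs; simp [selectTop_alt]
  | succ k ih =>
    intro xs
    cases h : PySem.List.max? xs (fun r => counts.getD r 0) with
    | none => simp [selectTop_alt, h, selSortRev_none h]
    | some m =>
      rw [selSortRev_some h]
      simp [selectTop_alt, h, ih]

-- A's grouping step is dict.modify
theorem stepA_eq_modify (d : PySem.Dict String (List (List String))) (row : List String) :
    (let rep := PySem.List.pyGetD row 3 ""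
     let d' := if d.contains rep then d else d.insert rep ([] : List (List String))
     d'.insert rep (d'.getD rep [] ++ [row])) =
    d.modify (repOf row) [] (· ++ [row]) := by
  show _ = PySem.Dict.modify _ _ _ _
  simp only [PySem.Dict.modify, repOf]
  by_cases hc : d.contains (PySem.List.pyGetD row 3 "")
  · simp [hc]
  · simp only [hc, if_false, Bool.false_eq_true]
    rw [PySem.Dict.getD_insert_self, PySem.Dict.insert_insert_self,
      PySem.Dict.getD_of_not_contains d [] (by simpa using hc)]

def groupOf (valid : List (List String)) : PySem.Dict String (List (List String)) :=
  valid.foldl (fun d row => d.modify (repOf row) [] (· ++ [row])) PySem.Dict.empty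

theorem groupA_eq (rows : List (List String)) :
    rows.foldl (fun d row =>
      if row.length < 5 then d
      else
        let rep := PySem.List.pyGetD row 3 ""
        let d' := if d.contains rep then d else d.insert rep ([] : List (List String))
        d'.insert rep (d'.getD rep [] ++ [row])) PySem.Dict.empty = groupOf (validOf rows) := by
  have h1 : ∀ (d : PySem.Dict String (List (List String))) (row : List String),
      (if row.length < 5 then d
       else
        let rep := PySem.List.pyGetD row 3 ""
        let d' := if d.contains rep then d else d.insert rep ([] : List (List String))
        d'.insert rep (d'.getD rep [] ++ [row])) =
      (if row.length ≥ 5 then d.modify (repOf row) [] (· ++ [row]) else d) := by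
    intro d row
    by_cases h : row.length < 5
    · rw [if_pos h, if_neg (by omega)]
    · rw [if_neg h, if_pos (by omega), stepA_eq_modify]
  rw [funext fun d => funext fun row => h1 d row]
  exact PySem.List.foldl_ite_eq_foldl_filter (fun row => row.length ≥ 5)
    (fun d row => d.modify (repOf row) [] fun x => x ++ [row]) rows PySem.Dict.empty

def repOrder (valid : List (List String)) : List String := PySem.Set.ofList (valid.map repOf)

theorem group_keys (valid : List (List String)) : (groupOf valid).keys = repOrder valid := by
  unfold groupOf repOrder
  rw [PySem.Dict.keys_foldl_modify_key valid repOf ([] : List (List String))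
    (fun _ row => fun v => v ++ [row])]
  rfl

theorem group_keys_nodup (valid : List (List String)) : (groupOf valid).keys.Nodup := by
  unfold groupOf
  exact PySem.Dict.nodup_keys_foldl_modify_key valid repOf ([] : List (List String))
    (fun _ row => fun v => v ++ [row]) _ (by simp [PySem.Dict.keys_empty])

theorem group_getD (valid : List (List String)) (c : String) :
    (groupOf valid).getD c [] = dealsOf valid c := by
  unfold groupOf
  have hmap : valid.foldl (fun d row => d.modify (repOf row) [] (· ++ [row])) PySem.Dict.empty
      = (valid.map (fun row => (repOf row, row))).foldl
          (fun d p => d.modify p.1 [] (· ++ [p.2])) PySem.Dict.empty := by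
    rw [List.foldl_map]
  rw [hmap, PySem.Dict.getD_foldl_modify_append]
  rw [List.filter_map]
  simp only [List.map_map]
  rw [show ((fun x => x.2) ∘ fun row => (repOf row, row)) = id from rfl, List.map_id]
  rfl

theorem group_items (valid : List (List String)) :
    (groupOf valid).items = (repOrder valid).map (fun k => (k, dealsOf valid k)) := by
  rw [PySem.Dict.items_eq_map_keys _ (group_keys_nodup valid) []]
  rw [group_keys]
  exact List.map_congr_left (fun k _ => by simp [group_getD])

def countsOf (valid : List (List String)) : PySem.Dict String Int :=
  valid.foldl (fun d row =>
    d.insert (PySem.List.pyGetD row 3 "") (d.getD (PySem.List.pyGetD row 3 "") 0 + 1))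
    PySem.Dict.empty

theorem countsOf_eq_counter (valid : List (List String)) :
    countsOf valid = PySem.Dict.counter (valid.map repOf) := by
  unfold countsOf
  rw [← PySem.Dict.foldl_insert_getD_add_one_eq_counter, List.foldl_map]
  rfl

theorem counts_keys (valid : List (List String)) : (countsOf valid).keys = repOrder valid := by
  rw [countsOf_eq_counter, PySem.Dict.keys_counter]; rfl

theorem counts_getD (valid : List (List String)) (r : String) :
    (countsOf valid).getD r 0 = ((dealsOf valid r).length : Int) := by
  rw [countsOf_eq_counter, PySem.Dict.getD_counter]
  congr 1
  rw [List.count, List.countP_map, List.countP_eq_length_filter]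
  rfl

theorem format_eq (valid : List (List String)) (k : String) :
    k ++ " — " ++ PySem.Str.join ", " (((dealsOf valid k).take 3).map (fun r => PySem.List.pyGetD r 1 ""))
      ++ (if (dealsOf valid k).length > 3
          then " + " ++ PySem.Int.toStr (((dealsOf valid k).length : Int) - 3) ++ " more" else "")
    = formatRep_alt k ((countsOf valid).getD k 0) valid := by
  unfold formatRep_alt
  rw [counts_getD]
  simp only [dealsOf, repOf]
  rw [← List.map_take]
  congr 1
  have : ((((valid.filter (fun row => PySem.List.pyGetD row 3 "" == k)).length : Int)) > 3)
      ↔ ((valid.filter (fun row => PySem.List.pyGetD row 3 "" == k)).length > 3) := by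
    exact_mod_cast Iff.rfl
  rw [if_congr this rfl rfl]

-- ===== VERDICT (by name: the statement is the Claim_ definition above) =====
theorem build_cosell_py_spec : Claim_equal_build_cosell_py := by
  intro rows _
  unfold Spec_build_cosell_py build_cosell_py build_cosell_py_alt
  by_cases h0 : rows = []
  · simp [h0]
  · rw [if_neg h0, if_neg h0]
    simp only [groupA_eq, group_items, sorted_rev_map, ← List.map_take,
      PySem.List.foldl_append_singleton_eq_map, List.map_map, List.nil_append]
    simp only [← validOf.eq_def, ← countsOf.eq_def]
    have hkey : (fun r => (countsOf (validOf rows)).getD r 0)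
        = (fun a => ((dealsOf (validOf rows) a).length : Int)) :=
      funext (counts_getD (validOf rows))
    rw [selectTop_eq_take, counts_keys, hkey,
      ← sorted_rev_eq_selSortRev (fun a => ((dealsOf (validOf rows) a).length : Int))
        (repOrder (validOf rows)) (PySem.Set.nodup_ofList _)]
    refine congrArg (fun l => l ++ _) (List.map_congr_left ?_)
    intro k _
    exact format_eq (validOf rows) k
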